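-- pv_equiv track=rewrite | github.com/ryan-lau314/ProjectEuler | src/util/string.py | __find_rightmost_rise
-- ===== SOURCE A (Python) =====
-- def __find_rightmost_rise(array):
--     """
--     Finds the largest i such that array[i] < array[i + 1].
--     If there is no such i, return None.
--     """
--     if len(array) == 1:
--         return None
--
--     i = len(array) - 2
--     while i >= 0:
--         if array[i] < array[i + 1]:
--             return i
--         i -= 1
--
--     return None
-- ===== SOURCE B (Python) =====
-- def __find_rightmost_rise(array):
--     result = None
--     for i in range(len(array) - 1):
--         if array[i] < array[i + 1]:
--             result = i
--     return result
-- ===== Notes on version B (the rewrite author's own statement) =====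
-- stated objective: alternative
-- what changed: Replaced A's backward while-loop with early return by a single forward pass over range(len-1) that overwrites an accumulator, so the last ascent index survives and empty/short inputs fall out of the empty range.
import Mathlib
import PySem

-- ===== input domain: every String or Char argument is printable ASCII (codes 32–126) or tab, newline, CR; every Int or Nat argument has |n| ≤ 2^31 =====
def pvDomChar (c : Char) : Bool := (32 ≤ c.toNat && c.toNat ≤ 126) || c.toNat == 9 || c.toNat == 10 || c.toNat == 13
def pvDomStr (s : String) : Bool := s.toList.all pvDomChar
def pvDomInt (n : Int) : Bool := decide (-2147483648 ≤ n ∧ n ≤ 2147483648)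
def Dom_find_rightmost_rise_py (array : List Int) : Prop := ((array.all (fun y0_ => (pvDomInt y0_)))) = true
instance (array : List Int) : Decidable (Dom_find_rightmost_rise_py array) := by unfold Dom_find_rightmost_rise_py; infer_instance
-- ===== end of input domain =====

-- B replaces A's backward early-return while-loop by a forward fold that keeps the last ascent index (alternative decomposition, same cost).
-- ===== PORT A =====
-- A's while-loop counts i down from len-2 to 0; fuel k encodes i = k-1 (k = 0 is loop exit).
-- Indices i, i+1 are always in range (0 ≤ i ≤ len-2), so List.getD is exact for array[i].
def find_rightmost_rise_py_loop (array : List Int) : Nat → Option Int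
  | 0 => none
  | k + 1 => if array.getD k 0 < array.getD (k + 1) 0 then some (k : Int) else find_rightmost_rise_py_loop array k

def find_rightmost_rise_py (array : List Int) : Option Int :=
  if array.length == 1 then none
  else find_rightmost_rise_py_loop array (array.length - 1)

-- ===== PORT B =====
-- forward for-loop over range(len-1) with an overwriting accumulator (Source B)
def find_rightmost_rise_py_alt (array : List Int) : Option Int :=
  (List.range (array.length - 1)).foldl
    (fun result i => if array.getD i 0 < array.getD (i + 1) 0 then some (i : Int) else result) none

-- ===== PRECONDITION & SPEC =====
def Spec_find_rightmost_rise_py (array : List Int) (out : Option Int) : Prop := out = find_rightmost_rise_py_alt array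
instance (array : List Int) (out : Option Int) : Decidable (Spec_find_rightmost_rise_py array out) := by unfold Spec_find_rightmost_rise_py; infer_instance

-- ===== CLAIM (what is proved, stated in full; the proofs are below) =====
def Claim_equal_find_rightmost_rise_py : Prop := ∀ (array : List Int), Dom_find_rightmost_rise_py array → Spec_find_rightmost_rise_py array (find_rightmost_rise_py array)

-- ===== LEMMAS AND PROOFS =====
lemma loop_eq_foldl (array : List Int) : ∀ n : Nat,
    find_rightmost_rise_py_loop array n =
      (List.range n).foldl
        (fun result i => if array.getD i 0 < array.getD (i + 1) 0 then some (i : Int) else result) none := by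
  intro n
  induction n with
  | zero => simp [find_rightmost_rise_py_loop]
  | succ k ih => simp [find_rightmost_rise_py_loop, List.range_succ, ih]

-- ===== VERDICT (by name: the statement is the Claim_ definition above) =====
theorem find_rightmost_rise_py_spec : Claim_equal_find_rightmost_rise_py := by
  intro array _
  unfold Spec_find_rightmost_rise_py find_rightmost_rise_py find_rightmost_rise_py_alt
  by_cases h : array.length = 1
  · simp [h]
  · simp [h, loop_eq_foldl]
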